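-- pv_equiv track=rewrite | github.com/wally-wally/TIL | 02_algorithm/sw_expert_academy/code_problem/D4/4530.극한의 청소 직업/4530.py.py | check
-- ===== SOURCE A (Python) =====
-- def check(num):
--     step = 0
--     length = len(str(num))
--     str_num = str(num)
--     digit = 0
--     for i in range(length - 1, -1, -1):
--         value = int(str_num[i])
--         if value > 4:
--             value -= 1
--         step += value * pow(9, digit)
--         digit += 1
--     return step - 1
-- ===== SOURCE B (Python) =====
-- def check(num):
--     step = 0
--     for c in str(num):
--         value = int(c)
--         if value > 4:
--             value -= 1
--         step = step * 9 + value
--     return step - 1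
-- ===== Notes on version B (the rewrite author's own statement) =====
-- stated objective: simpler
-- what changed: B replaces A's reversed index loop maintaining a digit counter and recomputing pow(9,digit) each step with a single forward Horner accumulator over str(num).
import Mathlib
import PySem

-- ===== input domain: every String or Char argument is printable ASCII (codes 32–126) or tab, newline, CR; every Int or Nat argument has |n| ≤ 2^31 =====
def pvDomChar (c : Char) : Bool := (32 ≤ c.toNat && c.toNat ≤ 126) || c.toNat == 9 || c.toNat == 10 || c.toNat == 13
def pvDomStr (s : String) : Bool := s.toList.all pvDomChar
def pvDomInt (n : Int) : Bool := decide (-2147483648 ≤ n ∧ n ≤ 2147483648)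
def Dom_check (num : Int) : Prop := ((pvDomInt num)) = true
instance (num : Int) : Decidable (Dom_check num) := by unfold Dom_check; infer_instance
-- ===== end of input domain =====

-- B replaces A's reversed index loop with pow(9,digit) by a forward Horner accumulator (simpler).

-- ===== PORT A =====
-- str(num) is handled as its list of characters (PySem.Int.toChars); indices produced by the
-- loop are always in range, so pyGetD's default is never used; int(str_num[i]) is
-- PySem.Int.ofChars? — its .getD 0 is unreached under Pre_check (num ≥ 0 gives digit chars only).
def check (num : Int) : Int :=
  let str_num := PySem.Int.toChars num
  let length : Int := str_num.length
  let r := (PySem.List.pyRange (length - 1) (-1) (-1)).foldl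
    (fun (st : Int × Nat) i =>
      let value := (PySem.Int.ofChars? [PySem.List.pyGetD str_num i '0']).getD 0
      let value := if value > 4 then value - 1 else value
      (st.1 + value * 9 ^ st.2, st.2 + 1))
    (0, 0)
  r.1 - 1

-- ===== PORT B =====
-- forward Horner fold over the characters of str(num); same int(c) port as above
def check_alt (num : Int) : Int :=
  (PySem.Int.toChars num).foldl
    (fun step c =>
      let value := (PySem.Int.ofChars? [c]).getD 0
      let value := if value > 4 then value - 1 else value
      step * 9 + value) 0 - 1

-- ===== PRECONDITION & SPEC =====
-- Python A raises ValueError on negative num: str(num) starts with '-' and int('-') fails.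
def Pre_check (num : Int) : Prop := 0 ≤ num
instance (num : Int) : Decidable (Pre_check num) := by unfold Pre_check; infer_instance
def pvWitness_check : Int := 5059
def Spec_check (num : Int) (out : Int) : Prop := out = check_alt num
instance (num : Int) (out : Int) : Decidable (Spec_check num out) := by unfold Spec_check; infer_instance

-- ===== CLAIM (what is proved, stated in full; the proofs are below) =====
def Claim_equal_check : Prop := ∀ (num : Int), Dom_check num → Pre_check num → Spec_check num (check num)

-- ===== LEMMAS AND PROOFS =====

-- per-character value both programs compute
def pvVal (c : Char) : Int :=
  let v := (PySem.Int.ofChars? [c]).getD 0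
  if v > 4 then v - 1 else v

-- Horner fold with an arbitrary initial accumulator
theorem pv_horner_init (cs : List Char) (a : Int) :
    cs.foldl (fun step c => step * 9 + pvVal c) a
      = a * 9 ^ cs.length + cs.foldl (fun step c => step * 9 + pvVal c) 0 := by
  induction cs generalizing a with
  | nil => simp
  | cons c cs ih =>
    simp only [List.foldl_cons]
    rw [ih (a * 9 + pvVal c), ih (0 * 9 + pvVal c)]
    simp [List.length_cons, pow_succ]
    ring

-- A's reversed accumulation, written as a foldr over the characters, equals the Horner fold
theorem pv_foldr_horner (cs : List Char) :
    cs.foldr (fun c (st : Int × Nat) => (st.1 + pvVal c * 9 ^ st.2, st.2 + 1)) (0, 0)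
      = (cs.foldl (fun step c => step * 9 + pvVal c) 0, cs.length) := by
  induction cs with
  | nil => simp
  | cons c cs ih =>
    simp only [List.foldr_cons, ih, List.foldl_cons, List.length_cons]
    refine Prod.ext ?_ rfl
    show cs.foldl (fun step c => step * 9 + pvVal c) 0 + pvVal c * 9 ^ cs.length
        = cs.foldl (fun step c => step * 9 + pvVal c) (0 * 9 + pvVal c)
    rw [pv_horner_init cs (0 * 9 + pvVal c)]
    ring

-- ===== VERDICT (by name: the statement is the Claim_ definition above) =====
theorem check_spec : Claim_equal_check := by
  intro num _ _
  show ((PySem.List.pyRange (((PySem.Int.toChars num).length : Int) - 1) (-1) (-1)).foldl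
      (fun (st : Int × Nat) i =>
        (st.1 + pvVal (PySem.List.pyGetD (PySem.Int.toChars num) i '0') * 9 ^ st.2, st.2 + 1))
      (0, 0)).1 - 1
    = (PySem.Int.toChars num).foldl (fun step c => step * 9 + pvVal c) 0 - 1
  set cs := PySem.Int.toChars num with hcs
  have h1 : PySem.List.pyRange ((cs.length : Int) - 1) (-1) (-1)
      = (PySem.List.pyRange 0 (cs.length : Int) 1).reverse := by
    simpa using PySem.List.pyRange_neg_one_eq_reverse ((cs.length : Int) - 1) (-1)
  have h3 : (PySem.List.pyRange 0 (cs.length : Int) 1).map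
      (fun i => PySem.List.pyGetD cs i '0') = cs := by
    simpa [PySem.List.len] using PySem.List.map_pyGetD_pyRange_zero cs '0'
  have e1 : ((PySem.List.pyRange 0 (cs.length : Int) 1).reverse).foldl
      (fun (st : Int × Nat) i =>
        (st.1 + pvVal (PySem.List.pyGetD cs i '0') * 9 ^ st.2, st.2 + 1)) (0, 0)
      = (cs.reverse).foldl
          (fun (st : Int × Nat) v => (st.1 + pvVal v * 9 ^ st.2, st.2 + 1)) (0, 0) := by
    conv_rhs => rw [← h3, ← List.map_reverse, List.foldl_map]
  rw [h1, e1, List.foldl_reverse, pv_foldr_horner]
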